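-- pv_equiv track=rewrite | github.com/AnasAlzahrani/rct-trader | src/data_sources/clinical_trials.py | _parse_phases
-- ===== SOURCE A (Python) =====
-- from typing import List, Dict, Any, Optional, AsyncGenerator
--
-- def _parse_phases(phases: List[str]) -> Optional[str]:
--     """Parse phase list into single phase."""
--     if not phases:
--         return None
--     if len(phases) == 1:
--         return phases[0]
--     # Return highest phase for combined phases
--     phase_order = ["EARLY_PHASE1", "PHASE1", "PHASE2", "PHASE3", "PHASE4"]
--     highest = None
--     highest_idx = -1
--     for phase in phases:
--         try:
--             idx = phase_order.index(phase)
--             if idx > highest_idx: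
--                 highest_idx = idx
--                 highest = phase
--         except ValueError:
--             continue
--     return highest
-- ===== SOURCE B (Python) =====
-- from typing import List, Optional
--
-- def _parse_phases(phases: List[str]) -> Optional[str]:
--     """Parse phase list into single phase."""
--     if not phases:
--         return None
--     if len(phases) == 1:
--         return phases[0]
--     phase_order = ["EARLY_PHASE1", "PHASE1", "PHASE2", "PHASE3", "PHASE4"]
--     phase_set = set(phases)
--     for phase in reversed(phase_order):
--         if phase in phase_set:
--             return phase
--     return None
-- ===== Notes on version B (the rewrite author's own statement) =====
-- stated objective: faster
-- what changed: Instead of scanning the input while tracking the maximum phase_order index via repeated list.index calls, B builds a set of the input once and scans the fixed ranking from highest to lowest, returning the first ranked phase present.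
import Mathlib
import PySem

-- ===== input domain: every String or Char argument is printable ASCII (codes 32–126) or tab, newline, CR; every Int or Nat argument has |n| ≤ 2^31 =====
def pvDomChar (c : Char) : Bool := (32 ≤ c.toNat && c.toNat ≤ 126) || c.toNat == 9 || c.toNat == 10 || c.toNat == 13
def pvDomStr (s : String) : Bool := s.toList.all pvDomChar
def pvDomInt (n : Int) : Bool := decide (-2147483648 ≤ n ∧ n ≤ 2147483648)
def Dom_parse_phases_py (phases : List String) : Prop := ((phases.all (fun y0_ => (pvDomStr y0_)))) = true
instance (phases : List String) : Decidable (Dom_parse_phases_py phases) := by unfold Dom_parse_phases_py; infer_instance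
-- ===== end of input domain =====

-- B replaces A's max-index tracking loop (repeated list.index scans) by one set of the input
-- and a highest-to-lowest scan of the fixed ranking; same return value, alternative structure.

-- ===== PORT A =====
def pvPhaseOrder : List String := ["EARLY_PHASE1", "PHASE1", "PHASE2", "PHASE3", "PHASE4"]

def pvStep (st : Option String × Int) (phase : String) : Option String × Int :=
  match PySem.List.index? pvPhaseOrder phase with
  | none => st                                   -- ValueError: continue
  | some idx => if (idx : Int) > st.2 then (some phase, (idx : Int)) else st

def parse_phases_py (phases : List String) : Option String :=
  match phases with
  | [] => none
  | [p] => some p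
  | _ => (phases.foldl pvStep (none, -1)).1

-- ===== PORT B =====
def pvPhaseOrderB : List String := ["EARLY_PHASE1", "PHASE1", "PHASE2", "PHASE3", "PHASE4"]

def parse_phases_py_alt (phases : List String) : Option String :=
  match phases with
  | [] => none
  | p :: rest =>
    if rest.isEmpty then some p
    else
      let phaseSet := PySem.Set.ofList phases
      pvPhaseOrderB.reverse.find? (fun q => PySem.Set.contains phaseSet q)

-- ===== PRECONDITION & SPEC =====
def Spec_parse_phases_py (phases : List String) (out : Option String) : Prop := out = parse_phases_py_alt phases
instance (phases : List String) (out : Option String) : Decidable (Spec_parse_phases_py phases out) := by unfold Spec_parse_phases_py; infer_instance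

-- ===== CLAIM (what is proved, stated in full; the proofs are below) =====
def Claim_equal_parse_phases_py : Prop := ∀ (phases : List String), Dom_parse_phases_py phases → Spec_parse_phases_py phases (parse_phases_py phases)

-- ===== LEMMAS AND PROOFS =====

-- A's running index for one element: index in pvPhaseOrder, or -1 if absent.
def pvCi (p : String) : Int :=
  match PySem.List.index? pvPhaseOrder p with
  | none => -1
  | some i => (i : Int)

-- the loop state A's fold keeps, as a function of the best index so far
def pvEnc (j : Int) : Option String × Int :=
  (if j < 0 then none else pvPhaseOrder[j.toNat]?, j)

-- the best index after folding l starting from j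
def pvM (l : List String) (j : Int) : Int :=
  l.foldl (fun a p => max a (pvCi p)) j

lemma pvCi_le (p : String) : pvCi p ≤ 4 := by
  unfold pvCi
  cases h : PySem.List.index? pvPhaseOrder p with
  | none => norm_num
  | some i =>
    obtain ⟨hk, -, -⟩ := PySem.List.getElem_of_index?_eq_some h
    simp only [pvPhaseOrder] at hk
    simp at hk ⊢
    omega

lemma pvCi_eq_nat (p : String) (k : Nat) (h : pvCi p = (k : Int)) :
    pvPhaseOrder[k]? = some p := by
  unfold pvCi at h
  cases hi : PySem.List.index? pvPhaseOrder p with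
  | none => rw [hi] at h; simp at h
  | some i =>
    rw [hi] at h
    simp at h
    have hik : i = k := by exact_mod_cast h
    subst hik
    obtain ⟨hk, hget, -⟩ := PySem.List.getElem_of_index?_eq_some hi
    simp [List.getElem?_eq_getElem hk, hget]

lemma pvStep_enc (j : Int) (hj : -1 ≤ j) (p : String) :
    pvStep (pvEnc j) p = pvEnc (max j (pvCi p)) := by
  unfold pvStep pvCi pvEnc
  cases h : PySem.List.index? pvPhaseOrder p with
  | none =>
    have : max j (-1) = j := by omega
    simp [this]
  | some i =>
    obtain ⟨hk, hget, -⟩ := PySem.List.getElem_of_index?_eq_some h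
    by_cases hgt : (i : Int) > j
    · have hmax : max j (i : Int) = (i : Int) := by omega
      simp [hgt, hmax, List.getElem?_eq_getElem hk, hget]
    · have hmax : max j (i : Int) = j := by omega
      simp [hgt, hmax]

lemma pvFold_enc (l : List String) : ∀ j : Int, -1 ≤ j →
    l.foldl pvStep (pvEnc j) = pvEnc (pvM l j) := by
  induction l with
  | nil => intro j _; simp [pvM]
  | cons x t ih =>
    intro j hj
    have h1 : -1 ≤ max j (pvCi x) := by omega
    simp only [List.foldl_cons, pvStep_enc j hj x, pvM]
    exact ih (max j (pvCi x)) h1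

lemma pvM_ge (l : List String) (j : Int) : j ≤ pvM l j := by
  induction l generalizing j with
  | nil => simp [pvM]
  | cons x t ih =>
    simp only [pvM, List.foldl_cons]
    have := ih (max j (pvCi x))
    simp only [pvM] at this
    omega

lemma pvM_le_mem (l : List String) : ∀ (j : Int) (p : String), p ∈ l → pvCi p ≤ pvM l j := by
  induction l with
  | nil => intro j p hp; cases hp
  | cons x t ih =>
    intro j p hp
    simp only [pvM, List.foldl_cons]
    rcases List.mem_cons.mp hp with rfl | hp
    · have h := pvM_ge t (max j (pvCi p))
      simp only [pvM] at h
      omega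
    · exact ih (max j (pvCi x)) p hp

lemma pvM_attained (l : List String) : ∀ j : Int, pvM l j = j ∨ ∃ p ∈ l, pvM l j = pvCi p := by
  induction l with
  | nil => intro j; left; simp [pvM]
  | cons x t ih =>
    intro j
    have hM : pvM (x :: t) j = pvM t (max j (pvCi x)) := by simp [pvM]
    rcases ih (max j (pvCi x)) with h | ⟨p, hp, h⟩
    · rcases max_choice j (pvCi x) with hm | hm
      · left; rw [hM, h, hm]
      · right; exact ⟨x, List.mem_cons_self .., by rw [hM, h, hm]⟩
    · right; exact ⟨p, List.mem_cons_of_mem x hp, by rw [hM, h]⟩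

lemma pvM_le4 (l : List String) : pvM l (-1) ≤ 4 := by
  rcases pvM_attained l (-1) with h | ⟨p, _, h⟩
  · omega
  · rw [h]; exact pvCi_le p

lemma pvM_ne (l : List String) (k : Nat) (s : String) (hs : pvPhaseOrder[k]? = some s)
    (hns : s ∉ l) : pvM l (-1) ≠ (k : Int) := by
  intro hM
  rcases pvM_attained l (-1) with h | ⟨p, hp, h⟩
  · rw [h] at hM; omega
  · rw [h] at hM
    have hg := pvCi_eq_nat p k hM
    rw [hs] at hg
    exact hns (by injection hg with h'; rw [h']; exact hp)

lemma pvM_mem_le (l : List String) (s : String) (c : Int) (hc : pvCi s = c) (hs : s ∈ l) :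
    c ≤ pvM l (-1) := by
  rw [← hc]; exact pvM_le_mem l (-1) s hs

def pvChain (l : List String) : Option String :=
  if "PHASE4" ∈ l then some "PHASE4"
  else if "PHASE3" ∈ l then some "PHASE3"
  else if "PHASE2" ∈ l then some "PHASE2"
  else if "PHASE1" ∈ l then some "PHASE1"
  else if "EARLY_PHASE1" ∈ l then some "EARLY_PHASE1"
  else none

lemma pvA_char (l : List String) : (l.foldl pvStep (none, -1)).1 = pvChain l := by
  have henc : ((none, (-1:Int)) : Option String × Int) = pvEnc (-1) := rfl
  rw [henc, pvFold_enc l (-1) (by omega)]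
  have hub : pvM l (-1) ≤ 4 := pvM_le4 l
  have hlb : -1 ≤ pvM l (-1) := pvM_ge l (-1)
  unfold pvChain
  by_cases h4 : "PHASE4" ∈ l
  · have h := pvM_mem_le l _ 4 (by decide) h4
    have hm : pvM l (-1) = 4 := by omega
    simp [h4, hm, pvEnc, pvPhaseOrder]
  · have n4 := pvM_ne l 4 "PHASE4" (by decide) h4
    by_cases h3 : "PHASE3" ∈ l
    · have h := pvM_mem_le l _ 3 (by decide) h3
      have hm : pvM l (-1) = 3 := by omega
      simp [h4, h3, hm, pvEnc, pvPhaseOrder]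
    · have n3 := pvM_ne l 3 "PHASE3" (by decide) h3
      by_cases h2 : "PHASE2" ∈ l
      · have h := pvM_mem_le l _ 2 (by decide) h2
        have hm : pvM l (-1) = 2 := by omega
        simp [h4, h3, h2, hm, pvEnc, pvPhaseOrder]
      · have n2 := pvM_ne l 2 "PHASE2" (by decide) h2
        by_cases h1 : "PHASE1" ∈ l
        · have h := pvM_mem_le l _ 1 (by decide) h1
          have hm : pvM l (-1) = 1 := by omega
          simp [h4, h3, h2, h1, hm, pvEnc, pvPhaseOrder]
        · have n1 := pvM_ne l 1 "PHASE1" (by decide) h1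
          by_cases h0 : "EARLY_PHASE1" ∈ l
          · have h := pvM_mem_le l _ 0 (by decide) h0
            have hm : pvM l (-1) = 0 := by omega
            simp [h4, h3, h2, h1, h0, hm, pvEnc, pvPhaseOrder]
          · have n0 := pvM_ne l 0 "EARLY_PHASE1" (by decide) h0
            have hm : pvM l (-1) = -1 := by omega
            simp [h4, h3, h2, h1, h0, hm, pvEnc]

lemma pvB_char (l : List String) :
    pvPhaseOrderB.reverse.find? (fun p => PySem.Set.contains (PySem.Set.ofList l) p) = pvChain l := by
  have hrev : pvPhaseOrderB.reverse = ["PHASE4", "PHASE3", "PHASE2", "PHASE1", "EARLY_PHASE1"] := by decide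
  rw [hrev]
  unfold pvChain
  by_cases h4 : "PHASE4" ∈ l <;> by_cases h3 : "PHASE3" ∈ l <;>
    by_cases h2 : "PHASE2" ∈ l <;> by_cases h1 : "PHASE1" ∈ l <;>
      by_cases h0 : "EARLY_PHASE1" ∈ l <;>
        simp [List.find?, h4, h3, h2, h1, h0]

theorem parse_phases_py_spec : Claim_equal_parse_phases_py := by
  intro phases _
  unfold Spec_parse_phases_py
  match phases with
  | [] => rfl
  | [p] => rfl
  | a :: b :: t =>
    show (List.foldl pvStep (none, -1) (a :: b :: t)).1 =
      pvPhaseOrderB.reverse.find? (fun p => PySem.Set.contains (PySem.Set.ofList (a :: b :: t)) p)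
    rw [pvA_char, pvB_char]
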